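-- pv_equiv track=rewrite | github.com/emilyjenkins08/Recipes | transform_healthy.py | lookup_mod
-- ===== SOURCE A (Python) =====
-- import string
--
-- def remove_punc_lower(text):
--     return text.lower().translate(str.maketrans('', '', string.punctuation))
--
-- def lookup_mod(sen, lst):
-- 	name_lst = remove_punc_lower(sen).split()
-- 	for word in name_lst:
-- 		if word in lst:
-- 			return True
-- 		elif word[-1] == 's' and word[:-1] in lst:
-- 			return True
-- 	return False
-- ===== SOURCE B (Python) =====
-- import string
--
-- def remove_punc_lower(text):
--     return text.lower().translate(str.maketrans('', '', string.punctuation))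
--
-- def lookup_mod(sen, lst):
--     words = set(remove_punc_lower(sen).split())
--     singulars = {w[:-1] for w in words if w.endswith('s')}
--     for item in lst:
--         if item in words or item in singulars:
--             return True
--     return False
-- ===== Notes on version B (the rewrite author's own statement) =====
-- stated objective: alternative
-- what changed: Iterates over lst instead of over the sentence words, after precomputing a set of sentence tokens and a set of their s-stripped singular forms, replacing A's per-word 'in lst' scan and per-word suffix test.
import Mathlib
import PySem

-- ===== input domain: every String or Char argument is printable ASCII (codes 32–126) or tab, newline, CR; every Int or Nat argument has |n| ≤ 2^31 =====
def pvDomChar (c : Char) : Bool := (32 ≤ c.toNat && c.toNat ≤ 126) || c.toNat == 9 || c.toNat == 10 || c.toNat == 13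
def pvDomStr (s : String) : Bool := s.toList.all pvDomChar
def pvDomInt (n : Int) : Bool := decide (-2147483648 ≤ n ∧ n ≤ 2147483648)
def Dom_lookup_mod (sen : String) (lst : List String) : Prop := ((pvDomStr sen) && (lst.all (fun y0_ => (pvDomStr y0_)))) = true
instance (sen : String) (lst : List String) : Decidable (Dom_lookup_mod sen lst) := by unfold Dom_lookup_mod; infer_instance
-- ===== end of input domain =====

-- B iterates over lst against precomputed sets of sentence tokens and their s-stripped forms,
-- instead of A's per-word linear scan of lst; return value proved equal on the whole domain.

-- ===== PORT A =====
-- string.punctuation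
def pvPunct : List Char := "!\"#$%&'()*+,-./:;<=>?@[\\]^_`{|}~".toList

-- text.lower().translate(str.maketrans('', '', string.punctuation)):
-- the translation table only DELETES the punctuation code points, so it is exactly a filter.
def remove_punc_lower (text : String) : String :=
  String.ofList ((PySem.Str.lower text).toList.filter (fun c => !(pvPunct.contains c)))

-- the 'for word in name_lst' loop with its early returns
-- (word[-1] is PySem.Str.pyGet? word (-1); split() yields only nonempty words, so it is never none,
--  and '== some 's'' is Python's "word[-1] == 's'" there)
def lookupLoopA (lst : List String) : List String → Bool
  | [] => false
  | word :: rest =>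
    if lst.contains word then true
    else if (PySem.Str.pyGet? word (-1) == some 's')
            && lst.contains (PySem.Str.slice word none (some (-1))) then true
    else lookupLoopA lst rest

def lookup_mod (sen : String) (lst : List String) : Bool :=
  lookupLoopA lst (PySem.Str.split₀ (remove_punc_lower sen))

-- ===== PORT B =====
-- the 'for item in lst' loop with its early return
def lookupLoopB (words singulars : PySem.Set String) : List String → Bool
  | [] => false
  | item :: rest =>
    if PySem.Set.contains words item || PySem.Set.contains singulars item then true
    else lookupLoopB words singulars rest

def lookup_mod_alt (sen : String) (lst : List String) : Bool :=
  let words : PySem.Set String := PySem.Set.ofList (PySem.Str.split₀ (remove_punc_lower sen))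
  let singulars : PySem.Set String := PySem.Set.ofList
    ((words.filter (fun w => PySem.Str.endswith w "s")).map
      (fun w => PySem.Str.slice w none (some (-1))))
  lookupLoopB words singulars lst

-- ===== PRECONDITION & SPEC =====
def Spec_lookup_mod (sen : String) (lst : List String) (out : Bool) : Prop := out = lookup_mod_alt sen lst
instance (sen : String) (lst : List String) (out : Bool) : Decidable (Spec_lookup_mod sen lst out) := by unfold Spec_lookup_mod; infer_instance

-- ===== CLAIM (what is proved, stated in full; the proofs are below) =====
def Claim_equal_lookup_mod : Prop := ∀ (sen : String) (lst : List String), Dom_lookup_mod sen lst → Spec_lookup_mod sen lst (lookup_mod sen lst)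

-- ===== LEMMAS AND PROOFS =====

theorem lookupLoopA_eq_any (lst ws : List String) :
    lookupLoopA lst ws = ws.any (fun w =>
      lst.contains w || ((PySem.Str.pyGet? w (-1) == some 's')
        && lst.contains (PySem.Str.slice w none (some (-1))))) := by
  induction ws with
  | nil => rfl
  | cons w rest ih =>
    simp only [lookupLoopA, List.any_cons]
    rw [ih]
    cases h1 : lst.contains w <;>
      cases h2 : ((PySem.Str.pyGet? w (-1) == some 's')
          && lst.contains (PySem.Str.slice w none (some (-1)))) <;>
      simp

theorem lookupLoopB_eq_any (words singulars : PySem.Set String) (lst : List String) :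
    lookupLoopB words singulars lst = lst.any (fun i =>
      PySem.Set.contains words i || PySem.Set.contains singulars i) := by
  induction lst with
  | nil => rfl
  | cons i rest ih =>
    simp only [lookupLoopB, List.any_cons]
    rw [ih]
    cases h : (PySem.Set.contains words i || PySem.Set.contains singulars i) <;>
      simp

theorem pyGet_neg_one_eq_getLast? (l : List Char) :
    PySem.List.pyGet? l (-1) = l.getLast? := by
  simp [PySem.List.pyGet?, PySem.List.pyIdx?]
  rcases List.eq_nil_or_concat l with h | ⟨ys, a, rfl⟩
  · simp [h]
  · simp

theorem last_s_eq_endswith (w : String) :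
    (PySem.Str.pyGet? w (-1) == some 's') = PySem.Str.endswith w "s" := by
  have h : PySem.Str.pyGet? w (-1) = w.toList.getLast? := by
    simpa using pyGet_neg_one_eq_getLast? w.toList
  have he : PySem.Str.endswith w "s" = PySem.Chars.endswith w.toList ['s'] := by
    simp [PySem.Str.endswith]
  rw [h, he, Bool.eq_iff_iff, beq_iff_eq, PySem.Chars.endswith_iff,
    List.getLast?_eq_some_iff]
  constructor
  · rintro ⟨ys, hys⟩
    exact ⟨ys, hys.symm⟩
  · rintro ⟨ys, hys⟩
    exact ⟨ys, hys.symm⟩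

-- ===== VERDICT (by name: the statement is the Claim_ definition above) =====
theorem lookup_mod_spec : Claim_equal_lookup_mod := by
  intro sen lst _
  unfold Spec_lookup_mod
  simp only [lookup_mod, lookup_mod_alt]
  rw [lookupLoopA_eq_any, lookupLoopB_eq_any, Bool.eq_iff_iff,
    List.any_eq_true, List.any_eq_true]
  constructor
  · rintro ⟨w, hw, hcond⟩
    rcases Bool.or_eq_true_iff.mp hcond with hwl | hrest
    · refine ⟨w, List.contains_iff_mem.mp hwl, ?_⟩
      exact Bool.or_eq_true_iff.mpr (Or.inl
        ((PySem.Set.contains_iff _ _).mpr ((PySem.Set.mem_ofList _ _).mpr hw)))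
    · obtain ⟨hes, hsl⟩ := (Bool.and_eq_true _ _ ▸ hrest)
      rw [last_s_eq_endswith] at hes
      refine ⟨PySem.Str.slice w none (some (-1)), List.contains_iff_mem.mp hsl, ?_⟩
      refine Bool.or_eq_true_iff.mpr (Or.inr ((PySem.Set.contains_iff _ _).mpr
        ((PySem.Set.mem_ofList _ _).mpr ?_)))
      exact List.mem_map.mpr ⟨w,
        List.mem_filter.mpr ⟨(PySem.Set.mem_ofList _ _).mpr hw, hes⟩, rfl⟩
  · rintro ⟨i, hil, hi⟩
    rcases Bool.or_eq_true_iff.mp hi with hi | hi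
    · have hiw : i ∈ PySem.Str.split₀ (remove_punc_lower sen) :=
        (PySem.Set.mem_ofList _ _).mp ((PySem.Set.contains_iff _ _).mp hi)
      exact ⟨i, hiw, Bool.or_eq_true_iff.mpr (Or.inl (List.contains_iff_mem.mpr hil))⟩
    · have hise := (PySem.Set.mem_ofList _ _).mp ((PySem.Set.contains_iff _ _).mp hi)
      obtain ⟨w, hwf, hwi⟩ := List.mem_map.mp hise
      obtain ⟨hwmem, hwe⟩ := List.mem_filter.mp hwf
      refine ⟨w, (PySem.Set.mem_ofList _ _).mp hwmem, Bool.or_eq_true_iff.mpr (Or.inr ?_)⟩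
      rw [last_s_eq_endswith]
      exact (Bool.and_eq_true _ _).symm ▸ (⟨hwe, List.contains_iff_mem.mpr (hwi ▸ hil)⟩ : _ ∧ _)
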